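-- pv_equiv track=rewrite | github.com/Changissnz/DER | numerical_generator.py | is_valid_map
-- ===== SOURCE A (Python) =====
-- def is_valid_map(m):
--     # fetch the first element in the map
--     q = None
--     for k in m.keys():
--         q = k
--         break
--
--     # check for cycle
--     x = [q]
--     l = len(m)
--     c = 0
--     while c < l:
--         r = m[x[-1]]
--         x.append(r)
--         c += 1
--
--     # check that last element is first key
--     if not (x[-1] == x[0]): return False
--     # check that number of unique elements is l
--     if len(set(x)) != l: return False
--     return True
-- ===== SOURCE B (Python) =====
-- def is_valid_map(m):
--     # First-return-time cycle test, O(1) extra space: follow successors from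
--     # the first key and return as soon as the walk comes back to it.  The walk
--     # first returns to its start after exactly len(m) steps iff m is one full
--     # cycle (an earlier repeat of any other node would trap the walk in a cycle
--     # not containing the start, so it could never return at all).
--     if not m:
--         return False
--     cur = q = next(iter(m))
--     for steps in range(len(m)):
--         cur = m[cur]
--         if cur == q:
--             return steps == len(m) - 1
--     return False
-- ===== Notes on version B (the rewrite author's own statement) =====
-- stated objective: simpler
-- what changed: B replaces A's pipeline (walk exactly len(m) steps recording the whole path list, then compare last vs first and deduplicate the path with set()) by a first-return-time test in O(1) extra space: it follows successors from the first key and returns as soon as the walk comes back to it, valid iff that first return happens after exactly len(m) steps - no path list, no set, and an early exit; an earlier repeat of any other node traps the walk away from the start, so no separate distinctness check is needed.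
import Mathlib
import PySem

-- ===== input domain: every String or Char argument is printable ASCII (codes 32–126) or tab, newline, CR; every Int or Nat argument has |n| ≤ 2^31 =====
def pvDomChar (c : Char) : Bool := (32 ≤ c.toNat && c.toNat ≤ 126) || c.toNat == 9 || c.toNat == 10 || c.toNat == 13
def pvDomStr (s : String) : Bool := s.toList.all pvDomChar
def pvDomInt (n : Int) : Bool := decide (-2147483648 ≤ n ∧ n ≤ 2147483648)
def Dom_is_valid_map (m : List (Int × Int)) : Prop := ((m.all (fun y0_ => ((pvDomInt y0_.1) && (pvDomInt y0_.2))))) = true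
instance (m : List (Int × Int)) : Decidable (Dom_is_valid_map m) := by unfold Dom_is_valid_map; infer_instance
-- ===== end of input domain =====

-- B replaces A's fixed len(m)-step walk (record the whole path list, then compare last vs
-- first and deduplicate with set()) by a first-return-time test in O(1) extra space: follow
-- successors from the first key and return as soon as the walk comes back to it; valid iff
-- that first return happens after exactly len(m) steps (objective: simpler).

-- ===== PORT A =====
-- Python's q starts as None, so the path list x is a List (Option Int);
-- a failing m[x[-1]] (KeyError in Python, excluded by Pre_) appends none here.
def is_valid_map (m : List (Int × Int)) : Bool :=
  let q : Option Int := (PySem.Dict.mk m).keys.head?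
  let x : List (Option Int) :=
    (List.range (PySem.Dict.mk m).size).foldl
      (fun x _ => x ++ [x.getLast? >>= fun ok => ok >>= fun k => (PySem.Dict.mk m).get? k]) [q]
  if !(x.getLast? == x.head?) then false
  else if (PySem.Set.ofList x).length != (PySem.Dict.mk m).size then false
  else true

-- ===== PORT B =====
-- the for-loop with its early return; 'remaining' counts the iterations still to run, so
-- Python's 'steps == len(m) - 1' (am I on the last iteration?) is 'remaining = 1', checked
-- as 'r = 0' after the pattern match; a failing m[cur] (KeyError, excluded by Pre_) is the
-- none branch
def pvAltLoop (d : PySem.Dict Int Int) (q cur : Int) : Nat → Bool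
  | 0 => false
  | r + 1 =>
    match d.get? cur with
    | none => false
    | some v => if v = q then decide (r = 0) else pvAltLoop d q v r

-- 'if not m: return False' = the keys-empty branch
def is_valid_map_alt (m : List (Int × Int)) : Bool :=
  match (PySem.Dict.mk m).keys with
  | [] => false
  | q :: _ => pvAltLoop (PySem.Dict.mk m) q q (PySem.Dict.mk m).size

-- ===== PRECONDITION & SPEC =====
-- the walk A performs: position after i steps, none once a lookup misses (Python's KeyError)
def pvReach (m : List (Int × Int)) : Nat → Option Int
  | 0 => (PySem.Dict.mk m).keys.head?
  | n + 1 => pvReach m n >>= fun k => (PySem.Dict.mk m).get? k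

-- Pre_: distinct keys (well-formedness of the assoc-list encoding of a Python dict) and the
-- len(m)-step walk from the first key never leaves the key set — exactly the KeyError-freedom
-- of A's loop (B performs a prefix of the same lookups and raises at the same step).
def Pre_is_valid_map (m : List (Int × Int)) : Prop :=
  (m.map Prod.fst).Nodup ∧ (m ≠ [] → ∀ i ≤ m.length, (pvReach m i).isSome)
instance (m : List (Int × Int)) : Decidable (Pre_is_valid_map m) := by
  unfold Pre_is_valid_map; infer_instance
def pvWitness_is_valid_map : (List (Int × Int)) := [(1, 2), (2, 1)]

def Spec_is_valid_map (m : List (Int × Int)) (out : Bool) : Prop := out = is_valid_map_alt m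
instance (m : List (Int × Int)) (out : Bool) : Decidable (Spec_is_valid_map m out) := by
  unfold Spec_is_valid_map; infer_instance

-- ===== CLAIM (what is proved, stated in full; the proofs are below) =====
def Claim_equal_is_valid_map : Prop :=
  ∀ (m : List (Int × Int)), Dom_is_valid_map m → Pre_is_valid_map m →
    Spec_is_valid_map m (is_valid_map m)

-- ===== LEMMAS AND PROOFS =====

-- the walk: w 0 = q, w (n+1) = m[w n] (total via getD 0; Pre_ keeps lookups successful)
def pvWalk (m : List (Int × Int)) (q : Int) : Nat → Int
  | 0 => q
  | n + 1 => (((PySem.Dict.mk m).get? (pvWalk m q n)).getD 0)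

-- under Pre_ the total walk pvWalk coincides with pvReach step by step
lemma pvReach_eq_walk (m : List (Int × Int)) (q : Int) (l : Nat)
    (hq : pvReach m 0 = some q) (hsome : ∀ i ≤ l, (pvReach m i).isSome) :
    ∀ i ≤ l, pvReach m i = some (pvWalk m q i) := by
  intro i
  induction i with
  | zero => intro _; simpa [pvWalk] using hq
  | succ i ih =>
    intro hil
    have hi : i ≤ l := Nat.le_of_succ_le hil
    have hr : pvReach m (i + 1) = (PySem.Dict.mk m).get? (pvWalk m q i) := by
      show pvReach m i >>= _ = _
      rw [ih hi]; rfl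
    obtain ⟨v, hv⟩ := Option.isSome_iff_exists.mp (hsome (i + 1) hil)
    rw [hr] at hv
    rw [hr, hv]
    simp [pvWalk, hv]

lemma pvWalk_step (m : List (Int × Int)) (q : Int) (l : Nat)
    (hq : pvReach m 0 = some q) (hsome : ∀ i ≤ l, (pvReach m i).isSome) :
    ∀ i < l, (PySem.Dict.mk m).get? (pvWalk m q i) = some (pvWalk m q (i + 1)) := by
  intro i hil
  have h1 := pvReach_eq_walk m q l hq hsome (i + 1) hil
  have hr : pvReach m (i + 1) = (PySem.Dict.mk m).get? (pvWalk m q i) := by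
    show pvReach m i >>= _ = _
    rw [pvReach_eq_walk m q l hq hsome i (Nat.le_of_succ_le hil)]; rfl
  rw [← hr, h1]

-- A's loop builds exactly the path [some (w 0), …, some (w i)]
lemma pvA_fold (m : List (Int × Int)) (q : Int) (l : Nat)
    (hstep : ∀ i < l, (PySem.Dict.mk m).get? (pvWalk m q i) = some (pvWalk m q (i + 1))) :
    ∀ i ≤ l, (List.range i).foldl
        (fun x _ => x ++ [x.getLast? >>= fun ok => ok >>= fun k => (PySem.Dict.mk m).get? k])
        [some q]
      = (List.range (i + 1)).map (fun j => some (pvWalk m q j)) := by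
  intro i
  induction i with
  | zero => intro _; simp [pvWalk]
  | succ i ih =>
    intro hil
    rw [List.range_succ, List.foldl_append, ih (Nat.le_of_succ_le hil)]
    have hlast : ((List.range (i + 1)).map (fun j => some (pvWalk m q j))).getLast?
        = some (some (pvWalk m q i)) := by
      rw [List.range_succ, List.map_append]
      simp
    simp only [List.foldl_cons, List.foldl_nil, hlast]
    rw [List.range_succ (n := i + 1), List.map_append]
    simp [hstep i (Nat.lt_of_succ_le hil)]

-- 'some' is injective, so deduplicating the path of options keeps the same cardinality
lemma pvLen_ofList_map_some (xs : List Int) :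
    (PySem.Set.ofList (xs.map some)).length = (PySem.Set.ofList xs).length := by
  induction xs using List.reverseRecOn with
  | nil => rfl
  | append_singleton xs x ih =>
    rw [List.map_append, List.map_singleton,
      PySem.Set.ofList_append_singleton, PySem.Set.ofList_append_singleton,
      PySem.Set.add_eq_ite, PySem.Set.add_eq_ite]
    by_cases h : x ∈ xs
    · have h1 : some x ∈ PySem.Set.ofList (xs.map some) := by
        rw [PySem.Set.mem_ofList]; exact List.mem_map_of_mem h
      have h2 : x ∈ PySem.Set.ofList xs := by rw [PySem.Set.mem_ofList]; exact h
      simp [h1, h2, ih]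
    · have h1 : some x ∉ PySem.Set.ofList (xs.map some) := by
        rw [PySem.Set.mem_ofList]
        simp [h]
      have h2 : x ∉ PySem.Set.ofList xs := by rw [PySem.Set.mem_ofList]; exact h
      simp [h1, h2, ih]

-- a walk prefix with no duplicate at any index is Nodup as a mapped range …
lemma pvNodup_of_fresh (w : Nat → Int) (n : Nat)
    (h : ∀ j < n, w j ∉ (List.range j).map w) : ((List.range n).map w).Nodup := by
  induction n with
  | zero => simp
  | succ n ih =>
    rw [List.range_succ, List.map_append]
    refine List.Nodup.append (ih (fun j hj => h j (Nat.lt_succ_of_lt hj))) (by simp) ?_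
    intro x hx hx'
    simp only [List.map_singleton, List.mem_singleton] at hx'
    exact h n (Nat.lt_succ_self n) (hx' ▸ hx)

-- … and conversely: a Nodup mapped range has no earlier duplicate at any index
lemma pvFresh_of_nodup (w : Nat → Int) (n : Nat)
    (h : ((List.range n).map w).Nodup) : ∀ j < n, w j ∉ (List.range j).map w := by
  induction n with
  | zero => intro j hj; omega
  | succ n ih =>
    rw [List.range_succ, List.map_append] at h
    obtain ⟨h1, _, hdisj⟩ := List.nodup_append.mp h
    intro j hj
    rcases Nat.lt_succ_iff_lt_or_eq.mp hj with hj' | rfl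
    · exact ih h1 j hj'
    · intro hmem
      exact hdisj _ hmem _ (by simp) rfl

-- a duplicated list loses length under set()
lemma pvOfList_length_lt (xs : List Int) (h : ¬ xs.Nodup) :
    (PySem.Set.ofList xs).length < xs.length := by
  induction xs using List.reverseRecOn with
  | nil => exact absurd List.nodup_nil h
  | append_singleton xs x ih =>
    rw [PySem.Set.ofList_append_singleton, PySem.Set.add_eq_ite]
    by_cases hx : x ∈ PySem.Set.ofList xs
    · have := PySem.Set.length_ofList_le (xs := xs)
      simp only [hx, if_true, List.length_append, List.length_singleton]
      omega
    · have hxs : ¬ xs.Nodup := by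
        intro hnd
        apply h
        refine List.Nodup.append hnd (by simp) ?_
        intro y hy hy'
        simp only [List.mem_singleton] at hy'
        exact hx (by rw [PySem.Set.mem_ofList]; exact hy' ▸ hy)
      have := ih hxs
      simp only [hx, if_false, List.length_append, List.length_singleton]
      omega

-- the walk is memoryless: equal positions give equal successors
lemma pvWalk_congr (m : List (Int × Int)) (q : Int) (a b : Nat)
    (h : pvWalk m q a = pvWalk m q b) : pvWalk m q (a + 1) = pvWalk m q (b + 1) := by
  show ((PySem.Dict.mk m).get? (pvWalk m q a)).getD 0 = _
  rw [h]; rfl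

-- once the walk repeats (w t = w s, s < t), every later value lies in the cycle w s … w (t-1)
lemma pvPeriodic (m : List (Int × Int)) (q : Int) (s t : Nat) (hst : s < t)
    (hrep : pvWalk m q t = pvWalk m q s) :
    ∀ j, t ≤ j → ∃ r, s ≤ r ∧ r < t ∧ pvWalk m q j = pvWalk m q r := by
  intro j hj
  induction j, hj using Nat.le_induction with
  | base => exact ⟨s, Nat.le_refl s, hst, hrep⟩
  | succ j hj ih =>
    obtain ⟨r, hsr, hrt, hjr⟩ := ih
    have hnext := pvWalk_congr m q j r hjr
    rcases Nat.lt_or_ge (r + 1) t with h | h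
    · exact ⟨r + 1, by omega, h, hnext⟩
    · have hrt' : r + 1 = t := by omega
      exact ⟨s, Nat.le_refl s, hst, by rw [hnext, hrt', hrep]⟩

-- B's loop along the walk: it answers 'the first return to q happens exactly at step l'
lemma pvAltLoop_char (m : List (Int × Int)) (q : Int) (l : Nat) (hlpos : 0 < l)
    (hstep : ∀ i < l, (PySem.Dict.mk m).get? (pvWalk m q i) = some (pvWalk m q (i + 1))) :
    ∀ k i, i + k = l → (∀ j, 0 < j → j ≤ i → pvWalk m q j ≠ q) →
      (pvAltLoop (PySem.Dict.mk m) q (pvWalk m q i) k = true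
        ↔ (pvWalk m q l = q ∧ ∀ j, i < j → j < l → pvWalk m q j ≠ q)) := by
  intro k
  induction k with
  | zero =>
    intro i hil hprev
    simp only [pvAltLoop]
    constructor
    · intro h; cases h
    · rintro ⟨hl, -⟩
      exact absurd hl (hprev l hlpos (by omega))
  | succ r ih =>
    intro i hil hprev
    have hi : i < l := by omega
    show (match (PySem.Dict.mk m).get? (pvWalk m q i) with
      | none => false
      | some v => if v = q then decide (r = 0) else pvAltLoop (PySem.Dict.mk m) q v r) = true ↔ _
    rw [hstep i hi]
    show (if pvWalk m q (i + 1) = q then decide (r = 0)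
        else pvAltLoop (PySem.Dict.mk m) q (pvWalk m q (i + 1)) r) = true ↔ _
    by_cases hv : pvWalk m q (i + 1) = q
    · simp only [hv, if_true]
      constructor
      · intro h
        have hr0 : r = 0 := by simpa using h
        have hl : i + 1 = l := by omega
        exact ⟨hl ▸ hv, by omega⟩
      · rintro ⟨hl, hno⟩
        have : ¬ (i + 1 < l) := fun hlt => hno (i + 1) (by omega) hlt hv
        have hr0 : r = 0 := by omega
        simp [hr0]
    · rw [if_neg hv]
      rw [ih (i + 1) (by omega) (by
        intro j hj0 hji
        rcases Nat.lt_succ_iff_lt_or_eq.mp (Nat.lt_succ_of_le hji) with h' | rfl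
        · exact hprev j hj0 (by omega)
        · exact hv)]
      constructor
      · rintro ⟨hl, hno⟩
        refine ⟨hl, ?_⟩
        intro j hj1 hj2
        rcases Nat.lt_or_ge i.succ j with h' | h'
        · exact hno j h' hj2
        · have : j = i + 1 := by omega
          exact this ▸ hv
      · rintro ⟨hl, hno⟩
        exact ⟨hl, fun j hj1 hj2 => hno j (by omega) hj2⟩

-- ===== VERDICT (by name: the statement is the Claim_ definition above) =====
theorem is_valid_map_spec : Claim_equal_is_valid_map := by
  intro m _hdom hpre
  unfold Spec_is_valid_map
  obtain ⟨hnd, hsome⟩ := hpre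
  cases m with
  | nil => decide
  | cons p rest =>
    have hkeys : (PySem.Dict.mk (p :: rest)).keys = p.1 :: rest.map Prod.fst := rfl
    set m := p :: rest with hm
    set l := (PySem.Dict.mk m).size with hl
    set w := pvWalk m p.1 with hw
    have hq0 : pvReach m 0 = some p.1 := by show (PySem.Dict.mk m).keys.head? = _; rw [hkeys]; rfl
    have hsome' : ∀ i ≤ l, (pvReach m i).isSome := by
      intro i hi
      exact hsome (by simp [hm]) i (by simpa [hl, hm, PySem.Dict.size] using hi)
    have hstep := pvWalk_step m p.1 l hq0 hsome'
    have hA := pvA_fold m p.1 l hstep l (Nat.le_refl l)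
    unfold is_valid_map is_valid_map_alt
    rw [hkeys]
    simp only [List.head?_cons]
    simp only [← hl, ← hw] at hA ⊢
    rw [hA]
    have hxlast : ((List.range (l + 1)).map (fun j => some (w j))).getLast?
        = some (some (w l)) := by
      rw [List.range_succ, List.map_append]; simp
    have hxhead : ((List.range (l + 1)).map (fun j => some (w j))).head?
        = some (some (w 0)) := by
      rw [List.range_succ_eq_map]; simp
    rw [hxlast, hxhead]
    have hw0 : w 0 = p.1 := rfl
    have hlpos : 0 < l := by simp [hl, hm, PySem.Dict.size]
    have hmaps : (List.range (l + 1)).map (fun j => some (w j))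
        = ((List.range (l + 1)).map w).map some := by
      rw [List.map_map]; rfl
    -- B = 'the walk first returns to q at step l exactly'
    have hB : pvAltLoop (PySem.Dict.mk m) p.1 p.1 l = true
        ↔ (w l = p.1 ∧ ∀ j, 0 < j → j < l → w j ≠ p.1) := by
      have h0 := pvAltLoop_char m p.1 l hlpos hstep l 0 (by omega) (fun j hj0 hj => by omega)
      rw [← hw] at h0
      exact h0
    by_cases hwl : w l = p.1
    · -- the walk closes after l steps; both sides reduce to 'no earlier visit of any node / of q'
      by_cases hND : ((List.range l).map w).Nodup
      · -- a single full cycle: both sides are true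
        have hsetsame : PySem.Set.ofList ((List.range (l + 1)).map w)
            = (List.range l).map w := by
          rw [List.range_succ, List.map_append, List.map_singleton,
            PySem.Set.ofList_append_singleton,
            PySem.Set.add_of_mem (by
              rw [PySem.Set.mem_ofList, hwl, ← hw0]
              exact List.mem_map_of_mem (List.mem_range.mpr hlpos)),
            PySem.Set.ofList_eq_self_of_nodup _ hND]
        have hBtrue : pvAltLoop (PySem.Dict.mk m) p.1 p.1 l = true := by
          rw [hB]
          refine ⟨hwl, ?_⟩
          intro j hj0 hjl hq
          exact pvFresh_of_nodup w l hND j hjl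
            (by rw [hq, ← hw0]; exact List.mem_map_of_mem (List.mem_range.mpr hj0))
        rw [hBtrue, hmaps, pvLen_ofList_map_some, hsetsame]
        simp [hw0, hwl]
      · -- a repeat before step l: A's dedup count falls short, and B's walk either came back
        -- to q early or can never come back at all
        have hcnt : (PySem.Set.ofList ((List.range (l + 1)).map w)).length < l := by
          have h1 : PySem.Set.ofList ((List.range (l + 1)).map w)
              = PySem.Set.ofList ((List.range l).map w) := by
            rw [List.range_succ, List.map_append, List.map_singleton,
              PySem.Set.ofList_append_singleton]
            apply PySem.Set.add_of_mem
            rw [PySem.Set.mem_ofList, hwl, ← hw0]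
            exact List.mem_map_of_mem (List.mem_range.mpr hlpos)
          have h2 := pvOfList_length_lt _ hND
          rw [h1]
          simpa using h2
        have hBfalse : pvAltLoop (PySem.Dict.mk m) p.1 p.1 l = false := by
          rw [Bool.eq_false_iff]
          intro htrue
          obtain ⟨-, hno⟩ := hB.mp htrue
          -- extract a repeat w t = w s with s < t < l
          have hex : ∃ t, t < l ∧ w t ∈ (List.range t).map w := by
            by_contra hall
            push Not at hall
            exact hND (pvNodup_of_fresh w l hall)
          obtain ⟨t, htl, hmem⟩ := hex
          obtain ⟨s, hs⟩ := List.mem_map.mp hmem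
          have hst : s < t := List.mem_range.mp hs.1
          have hrep : w t = w s := hs.2.symm
          -- the walk is trapped in the cycle w s … w (t-1); since w l = q, q = w r there
          obtain ⟨r, hsr, hrt, hlr⟩ := pvPeriodic m p.1 s t hst (by rw [← hw]; exact hrep) l
            (Nat.le_of_lt htl)
          rw [← hw] at hlr
          rcases Nat.eq_zero_or_pos r with hr0 | hrpos
          · -- r = 0 forces s = 0, so w t = w 0 = q: an early return at step t
            have hs0 : s = 0 := by omega
            exact hno t (by omega) htl (by rw [hrep, hs0, hw0])
          · -- 0 < r < t < l and w r = w l = q: an early return at step r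
            exact hno r hrpos (by omega) (by rw [← hlr, hwl])
        rw [hBfalse, hmaps, pvLen_ofList_map_some]
        have hne : (PySem.Set.ofList ((List.range (l + 1)).map w)).length ≠ l := by omega
        simp [hw0, hwl, hne]
    · -- the walk does not return to q at step l: both sides are false
      have hBfalse : pvAltLoop (PySem.Dict.mk m) p.1 p.1 l = false := by
        rw [Bool.eq_false_iff]
        intro htrue
        exact hwl (hB.mp htrue).1
      rw [hBfalse]
      simp [hw0, hwl]
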